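-- pv_equiv track=rewrite | github.com/gbestech/school-project-with-edward | backend/students/views.py | group_schedule_by_day
-- ===== SOURCE A (Python) =====
-- def group_schedule_by_day(schedule_data):
--     """Group schedule entries by day of week"""
--     days = [
--         "MONDAY",
--         "TUESDAY",
--         "WEDNESDAY",
--         "THURSDAY",
--         "FRIDAY",
--         "SATURDAY",
--         "SUNDAY",
--     ]
--     schedule_by_day = {day.lower(): [] for day in days}
--
--     for entry in schedule_data:
--         day = entry.get("day_of_week", "").upper()
--         if day in days:
--             schedule_by_day[day.lower()].append(entry)
--
--     # Sort each day's schedule by start time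
--     for day in schedule_by_day:
--         schedule_by_day[day].sort(key=lambda x: x.get("start_time", "00:00"))
--
--     return schedule_by_day
-- ===== SOURCE B (Python) =====
-- def group_schedule_by_day(schedule_data):
--     """Group schedule entries by day of week: one stable global sort by start
--     time, then a dict comprehension selecting each day's entries."""
--     days = [
--         "MONDAY",
--         "TUESDAY",
--         "WEDNESDAY",
--         "THURSDAY",
--         "FRIDAY",
--         "SATURDAY",
--         "SUNDAY",
--     ]
--     ordered = sorted(schedule_data, key=lambda x: x.get("start_time", "00:00"))
--     return {
--         day.lower(): [e for e in ordered if e.get("day_of_week", "").upper() == day]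
--         for day in days
--     }
-- ===== Notes on version B (the rewrite author's own statement) =====
-- stated objective: simpler
-- what changed: Instead of mutating per-day dict buckets and then sorting each bucket, B sorts the whole list once (stable) and builds the result as a dict comprehension selecting each day's entries from the sorted list.
import Mathlib
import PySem

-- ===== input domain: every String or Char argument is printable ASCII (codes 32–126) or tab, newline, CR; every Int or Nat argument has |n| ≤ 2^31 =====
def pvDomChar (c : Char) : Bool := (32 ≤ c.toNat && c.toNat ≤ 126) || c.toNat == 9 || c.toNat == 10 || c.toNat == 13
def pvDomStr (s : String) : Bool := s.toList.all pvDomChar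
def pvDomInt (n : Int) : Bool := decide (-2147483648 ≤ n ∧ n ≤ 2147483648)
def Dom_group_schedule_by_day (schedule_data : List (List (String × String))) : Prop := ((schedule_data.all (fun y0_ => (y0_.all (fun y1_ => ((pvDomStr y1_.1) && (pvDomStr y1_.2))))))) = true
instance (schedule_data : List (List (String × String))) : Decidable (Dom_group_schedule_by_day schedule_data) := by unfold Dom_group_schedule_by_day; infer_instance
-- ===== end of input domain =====

-- B groups by one stable global sort by start time plus a per-day selection,
-- instead of A's mutable per-day buckets each sorted afterwards; same result.

-- shared helpers (the same lambdas/expressions appear in both Python versions)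
def pvDays : List String :=
  ["MONDAY", "TUESDAY", "WEDNESDAY", "THURSDAY", "FRIDAY", "SATURDAY", "SUNDAY"]

-- entry.get("day_of_week", "").upper()
def pvEntryDay (e : List (String × String)) : String :=
  PySem.Str.upper ((PySem.Dict.ofList e).getD "day_of_week" "")

-- x.get("start_time", "00:00")
def pvStartKey (e : List (String × String)) : String :=
  (PySem.Dict.ofList e).getD "start_time" "00:00"

-- ===== PORT A =====
def group_schedule_by_day (schedule_data : List (List (String × String))) : List (String × List (List (String × String))) :=
  -- schedule_by_day = {day.lower(): [] for day in days}
  let init : PySem.Dict String (List (List (String × String))) :=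
    pvDays.foldl (fun d day => d.insert (PySem.Str.lower day) []) PySem.Dict.empty
  -- for entry in schedule_data: … if day in days: append
  let filled :=
    schedule_data.foldl (fun d e =>
      if pvDays.contains (pvEntryDay e) then
        d.modify (PySem.Str.lower (pvEntryDay e)) [] (fun l => l ++ [e])
      else d) init
  -- for day in schedule_by_day: sort that day's list in place; return the dict (as items)
  filled.items.map (fun p => (p.1, PySem.List.sorted p.2 pvStartKey))

-- ===== PORT B =====
def group_schedule_by_day_alt (schedule_data : List (List (String × String))) : List (String × List (List (String × String))) :=
  -- ordered = sorted(schedule_data, key=…)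
  let ordered := PySem.List.sorted schedule_data pvStartKey
  -- dict comprehension over the seven distinct day keys = this association list
  pvDays.map (fun day =>
    (PySem.Str.lower day, ordered.filter (fun e => pvEntryDay e == day)))

-- ===== PRECONDITION & SPEC =====
def Spec_group_schedule_by_day (schedule_data : List (List (String × String))) (out : List (String × List (List (String × String)))) : Prop := out = group_schedule_by_day_alt schedule_data
instance (schedule_data : List (List (String × String))) (out : List (String × List (List (String × String)))) : Decidable (Spec_group_schedule_by_day schedule_data out) := by unfold Spec_group_schedule_by_day; infer_instance

-- ===== CLAIM (what is proved, stated in full; the proofs are below) =====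
def Claim_equal_group_schedule_by_day : Prop := ∀ (schedule_data : List (List (String × String))), Dom_group_schedule_by_day schedule_data → Spec_group_schedule_by_day schedule_data (group_schedule_by_day schedule_data)

-- ===== LEMMAS AND PROOFS =====

-- The fill loop of A, abstracted
def pvFill (l : List (List (String × String))) (d : PySem.Dict String (List (List (String × String)))) : PySem.Dict String (List (List (String × String))) :=
  l.foldl (fun d e =>
    if pvDays.contains (pvEntryDay e) then
      d.modify (PySem.Str.lower (pvEntryDay e)) [] (fun l => l ++ [e])
    else d) d

theorem pvFill_getD (l : List (List (String × String))) (d : PySem.Dict String (List (List (String × String)))) (c : String) :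
    (pvFill l d).getD c [] =
      d.getD c [] ++ l.filter (fun e => pvDays.contains (pvEntryDay e) && (PySem.Str.lower (pvEntryDay e) == c)) := by
  induction l generalizing d with
  | nil => simp [pvFill]
  | cons e t ih =>
    by_cases hC : pvDays.contains (pvEntryDay e) = true
    · have hmem : pvEntryDay e ∈ pvDays := by simpa using hC
      rw [show pvFill (e :: t) d = pvFill t (d.modify (PySem.Str.lower (pvEntryDay e)) [] (fun l => l ++ [e])) from by
        simp only [pvFill, List.foldl_cons, hC, if_true]]
      rw [ih, PySem.Dict.getD_modify]
      by_cases hc : c = PySem.Str.lower (pvEntryDay e)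
      · subst hc
        rw [if_pos rfl, List.filter_cons_of_pos (by simp [hmem])]
        simp
      · rw [if_neg hc, List.filter_cons_of_neg (by simp; exact fun _ h => hc h.symm)]
    · have hmem : pvEntryDay e ∉ pvDays := by simpa using hC
      have hC' : pvDays.contains (pvEntryDay e) = false := by simpa using hC
      rw [show pvFill (e :: t) d = pvFill t d from by
        simp only [pvFill, List.foldl_cons, hC', Bool.false_eq_true, if_false]]
      rw [ih, List.filter_cons_of_neg (by simp; exact fun h => absurd h hmem)]

theorem pvFill_keys (l : List (List (String × String))) (d : PySem.Dict String (List (List (String × String))))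
    (h : ∀ e, pvDays.contains (pvEntryDay e) = true → d.contains (PySem.Str.lower (pvEntryDay e)) = true) :
    (pvFill l d).keys = d.keys := by
  induction l generalizing d with
  | nil => simp [pvFill]
  | cons e t ih =>
    by_cases hC : pvDays.contains (pvEntryDay e) = true
    · rw [show pvFill (e :: t) d = pvFill t (d.modify (PySem.Str.lower (pvEntryDay e)) [] (fun l => l ++ [e])) from by
        simp only [pvFill, List.foldl_cons, hC, if_true]]
      rw [ih]
      · rw [PySem.Dict.keys_modify, PySem.Dict.keys_insert_of_contains _ _ (h e hC)]
      · intro e' hC'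
        rw [PySem.Dict.contains_modify]
        simp [h e' hC']
    · have hC' : pvDays.contains (pvEntryDay e) = false := by simpa using hC
      rw [show pvFill (e :: t) d = pvFill t d from by
        simp only [pvFill, List.foldl_cons, hC', Bool.false_eq_true, if_false]]
      exact ih d h

-- the literal initial dict
def pvInit : PySem.Dict String (List (List (String × String))) :=
  PySem.Dict.mk [("monday", []), ("tuesday", []), ("wednesday", []), ("thursday", []),
                 ("friday", []), ("saturday", []), ("sunday", [])]

theorem pvInit_eq :
    pvDays.foldl (fun d day => d.insert (PySem.Str.lower day) ([] : List (List (String × String)))) PySem.Dict.empty = pvInit := by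
  decide

theorem pvInit_contains (s : String) (hs : pvDays.contains s = true) :
    pvInit.contains (PySem.Str.lower s) = true := by
  have hmem : s ∈ pvDays := by simpa using hs
  fin_cases hmem <;> decide

-- membership in days forces the day condition to be plain equality with that day
theorem pvDay_cond (day : String) (hday : day ∈ pvDays) (s : String) :
    (pvDays.contains s && (PySem.Str.lower s == PySem.Str.lower day)) = (s == day) := by
  by_cases hs : s ∈ pvDays
  · fin_cases hs <;> fin_cases hday <;> decide
  · have h1 : pvDays.contains s = false := by simpa using hs
    have h2 : (s == day) = false := by
      simp only [beq_eq_false_iff_ne, ne_eq]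
      rintro rfl; exact hs hday
    simp only [h1, Bool.false_and, h2]

-- insertBy inserts at the front when x precedes every element
theorem insertBy_all_before {α : Type} (before : α → α → Bool) (x : α) (l : List α)
    (h : ∀ z ∈ l, before x z = true) :
    PySem.List.insertBy before x l = x :: l := by
  cases l with
  | nil => rfl
  | cons z t => simp [PySem.List.insertBy, h z (by simp)]

-- insertBy preserves key-sortedness
theorem pairwise_insertBy {α κ : Type} [LinearOrder κ] (key : α → κ) (x : α) (ys : List α)
    (hys : ys.Pairwise (fun a b => key a ≤ key b)) :
    (PySem.List.insertBy (fun a b => decide (key a < key b)) x ys).Pairwise (fun a b => key a ≤ key b) := by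
  induction ys with
  | nil => simp [PySem.List.insertBy]
  | cons y t ih =>
    rcases List.pairwise_cons.mp hys with ⟨hy, ht⟩
    by_cases hb : key x < key y
    · simp only [PySem.List.insertBy, hb, decide_true, if_true]
      refine List.pairwise_cons.mpr ⟨?_, hys⟩
      intro z hz
      rcases List.mem_cons.mp hz with rfl | hz'
      · exact le_of_lt hb
      · exact le_trans (le_of_lt hb) (hy z hz')
    · simp only [PySem.List.insertBy, hb, decide_false, Bool.false_eq_true, if_false]
      refine List.pairwise_cons.mpr ⟨?_, ih ht⟩
      intro z hz
      rcases (PySem.List.mem_insertBy _ _ _ _).mp hz with rfl | hz'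
      · exact le_of_not_gt hb
      · exact hy z hz'

-- filtering commutes with a single stable insertion into a sorted list
theorem filter_insertBy {α κ : Type} [LinearOrder κ] (key : α → κ) (p : α → Bool) (x : α) (ys : List α)
    (hys : ys.Pairwise (fun a b => key a ≤ key b)) :
    (PySem.List.insertBy (fun a b => decide (key a < key b)) x ys).filter p =
      if p x then PySem.List.insertBy (fun a b => decide (key a < key b)) x (ys.filter p) else ys.filter p := by
  induction ys with
  | nil =>
    simp only [PySem.List.insertBy, List.filter_nil]
    by_cases hx : p x <;> simp [hx]
  | cons y t ih =>
    rcases List.pairwise_cons.mp hys with ⟨hy, ht⟩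
    by_cases hb : key x < key y
    · simp only [PySem.List.insertBy, hb, decide_true, if_true]
      by_cases hpy : p y
      · rw [show ((y :: t).filter p) = y :: t.filter p by simp [hpy]]
        simp [PySem.List.insertBy, hb, List.filter_cons, hpy]
      · rw [show ((y :: t).filter p) = t.filter p by simp [hpy]]
        have hall : ∀ z ∈ t.filter p, (fun a b => decide (key a < key b)) x z = true := by
          intro z hz
          have hz' : z ∈ t := List.mem_of_mem_filter hz
          simpa using lt_of_lt_of_le hb (hy z hz')
        rw [insertBy_all_before _ _ _ hall]
        by_cases hx : p x <;> simp [hx, hpy]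
    · simp only [PySem.List.insertBy, hb, decide_false, Bool.false_eq_true, if_false]
      by_cases hpy : p y
      · rw [show ((y :: t).filter p) = y :: t.filter p by simp [hpy]]
        by_cases hx : p x
        · simp only [hx, if_true] at ih ⊢
          simp [PySem.List.insertBy, hb, hpy, ih ht]
        · simp only [hx, Bool.false_eq_true, if_false] at ih ⊢
          simp [hpy, ih ht]
      · rw [show ((y :: t).filter p) = t.filter p by simp [hpy]]
        rw [List.filter_cons_of_neg (by simpa using hpy)]
        exact ih ht

theorem foldl_insertBy_filter {α κ : Type} [LinearOrder κ] (key : α → κ) (p : α → Bool) (l : List α)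
    (acc : List α) (hacc : acc.Pairwise (fun a b => key a ≤ key b)) :
    (l.foldl (fun acc x => PySem.List.insertBy (fun a b => decide (key a < key b)) x acc) acc).filter p =
      (l.filter p).foldl (fun acc x => PySem.List.insertBy (fun a b => decide (key a < key b)) x acc) (acc.filter p) := by
  induction l generalizing acc with
  | nil => simp
  | cons x t ih =>
    simp only [List.foldl_cons, List.filter_cons]
    rw [ih _ (pairwise_insertBy key x acc hacc)]
    rw [filter_insertBy key p x acc hacc]
    by_cases hx : p x <;> simp [hx]

-- a stable sort commutes with filtering
theorem sorted_filter {α κ : Type} [LinearOrder κ] (key : α → κ) (p : α → Bool) (xs : List α) :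
    PySem.List.sorted (xs.filter p) key = (PySem.List.sorted xs key).filter p := by
  rw [PySem.List.sorted_eq_foldl_insertBy, PySem.List.sorted_eq_foldl_insertBy]
  rw [foldl_insertBy_filter key p xs [] (by simp)]
  simp

-- characterisation of A's result
theorem groupA_eq (sd : List (List (String × String))) :
    group_schedule_by_day sd =
      pvDays.map (fun day =>
        (PySem.Str.lower day,
         PySem.List.sorted (sd.filter (fun e => pvEntryDay e == day)) pvStartKey)) := by
  show (pvFill sd (pvDays.foldl (fun d day => d.insert (PySem.Str.lower day) []) PySem.Dict.empty)).items.map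
      (fun p => (p.1, PySem.List.sorted p.2 pvStartKey)) = _
  rw [pvInit_eq]
  have hkeys : (pvFill sd pvInit).keys = pvInit.keys :=
    pvFill_keys sd pvInit (fun e hC => pvInit_contains _ hC)
  have hnd : (pvFill sd pvInit).keys.Nodup := by rw [hkeys]; decide
  rw [PySem.Dict.items_eq_map_keys _ hnd ([] : List (List (String × String)))]
  rw [hkeys]
  rw [show pvInit.keys = pvDays.map PySem.Str.lower from by decide]
  rw [List.map_map, List.map_map]
  refine List.map_congr_left ?_
  intro day hday
  simp only [Function.comp]
  rw [pvFill_getD]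
  rw [show pvInit.getD (PySem.Str.lower day) [] = [] from by fin_cases hday <;> decide]
  rw [List.nil_append]
  congr 1
  rw [show (sd.filter (fun e => pvDays.contains (pvEntryDay e) && (PySem.Str.lower (pvEntryDay e) == PySem.Str.lower day)))
        = sd.filter (fun e => pvEntryDay e == day) from
    List.filter_congr (fun e _ => pvDay_cond day hday (pvEntryDay e))]

-- ===== VERDICT (by name: the statement is the Claim_ definition above) =====
theorem group_schedule_by_day_spec : Claim_equal_group_schedule_by_day := by
  intro sd _
  show group_schedule_by_day sd = group_schedule_by_day_alt sd
  rw [groupA_eq]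
  unfold group_schedule_by_day_alt
  refine List.map_congr_left ?_
  intro day hday
  rw [sorted_filter]
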